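-- pv_equiv track=rewrite | github.com/AdamLouly/docparse | docparse/parser.py | _looks_like_vision_unavailable
-- ===== SOURCE A (Python) =====
-- def _looks_like_vision_unavailable(error_message: str) -> bool:
--     message = error_message.lower()
--     markers = [
--         "vision",
--         "image",
--         "multimodal",
--         "does not support",
--         "unsupported",
--         "cannot render",
--     ]
--     return any(marker in message for marker in markers)
-- ===== SOURCE B (Python) =====
-- def _looks_like_vision_unavailable(error_message: str) -> bool:
--     message = error_message.lower()
--     markers = (
--         "vision",
--         "image",
--         "multimodal",
--         "does not support",
--         "unsupported",
--         "cannot render",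
--     )
--     # single left-to-right positional scan instead of six independent substring searches
--     for i in range(len(message) + 1):
--         for marker in markers:
--             if message.startswith(marker, i):
--                 return True
--     return False
-- ===== Notes on version B (the rewrite author's own statement) =====
-- stated objective: alternative
-- what changed: Replaces the six independent substring-membership searches with one left-to-right positional scan that at each index tests whether any marker starts there (startswith with an offset).
import Mathlib
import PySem

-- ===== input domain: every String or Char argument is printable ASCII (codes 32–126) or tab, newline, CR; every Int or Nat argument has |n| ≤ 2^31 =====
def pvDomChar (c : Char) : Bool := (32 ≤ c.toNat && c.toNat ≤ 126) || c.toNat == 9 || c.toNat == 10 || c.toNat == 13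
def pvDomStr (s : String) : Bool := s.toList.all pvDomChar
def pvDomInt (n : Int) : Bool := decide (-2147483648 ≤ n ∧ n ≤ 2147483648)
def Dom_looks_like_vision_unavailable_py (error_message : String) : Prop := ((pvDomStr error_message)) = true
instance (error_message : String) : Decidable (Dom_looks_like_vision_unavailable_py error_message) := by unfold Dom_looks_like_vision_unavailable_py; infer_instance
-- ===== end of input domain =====

-- B replaces six independent substring searches by one left-to-right positional scan (alternative decomposition, same cost).

-- ===== PORT A =====
def looks_like_vision_unavailable_py (error_message : String) : Bool :=
  let message := PySem.Str.lower error_message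
  let markers : List String :=
    ["vision", "image", "multimodal", "does not support", "unsupported", "cannot render"]
  markers.any (fun marker => PySem.Str.isIn marker message)

-- ===== PORT B =====
-- one pass over positions: at each suffix, test whether some marker starts there (Source B's startswith(marker, i))
def pvScanMarkers (markers : List (List Char)) : List Char → Bool
  | [] => markers.any (fun m => m.isPrefixOf ([] : List Char))
  | c :: rest => markers.any (fun m => m.isPrefixOf (c :: rest)) || pvScanMarkers markers rest

def looks_like_vision_unavailable_py_alt (error_message : String) : Bool :=
  let message := PySem.Str.lower error_message
  let markers : List (List Char) :=
    (["vision", "image", "multimodal", "does not support", "unsupported", "cannot render"].map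
      String.toList)
  pvScanMarkers markers message.toList

-- ===== PRECONDITION & SPEC =====
def Spec_looks_like_vision_unavailable_py (error_message : String) (out : Bool) : Prop := out = looks_like_vision_unavailable_py_alt error_message
instance (error_message : String) (out : Bool) : Decidable (Spec_looks_like_vision_unavailable_py error_message out) := by unfold Spec_looks_like_vision_unavailable_py; infer_instance

-- ===== CLAIM (what is proved, stated in full; the proofs are below) =====
def Claim_equal_looks_like_vision_unavailable_py : Prop := ∀ (error_message : String), Dom_looks_like_vision_unavailable_py error_message → Spec_looks_like_vision_unavailable_py error_message (looks_like_vision_unavailable_py error_message)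

-- ===== LEMMAS AND PROOFS =====

theorem pvScanMarkers_iff (markers : List (List Char)) (l : List Char) :
    pvScanMarkers markers l = true ↔ ∃ m ∈ markers, m <:+: l := by
  induction l with
  | nil =>
      simp [pvScanMarkers, List.any_eq_true, List.prefix_iff_eq_take]
  | cons c rest ih =>
      simp only [pvScanMarkers, Bool.or_eq_true, List.any_eq_true, ih,
        List.isPrefixOf_iff_prefix]
      constructor
      · rintro (⟨m, hm, h⟩ | ⟨m, hm, h⟩)
        · exact ⟨m, hm, h.isInfix⟩
        · exact ⟨m, hm, List.infix_cons h⟩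
      · rintro ⟨m, hm, h⟩
        rcases (List.infix_cons_iff.mp h) with h' | h'
        · exact Or.inl ⟨m, hm, h'⟩
        · exact Or.inr ⟨m, hm, h'⟩

theorem pvScanMarkers_eq_any (markers : List String) (l : List Char) :
    pvScanMarkers (markers.map String.toList) l
      = markers.any (fun m => PySem.Chars.isIn m.toList l) := by
  rcases h : markers.any (fun m => PySem.Chars.isIn m.toList l) with _ | _
  · rw [Bool.eq_false_iff]
    intro hc
    rcases (pvScanMarkers_iff _ _).mp hc with ⟨m, hm, hinf⟩
    rcases List.mem_map.mp hm with ⟨s, hs, rfl⟩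
    have : markers.any (fun m => PySem.Chars.isIn m.toList l) = true :=
      List.any_eq_true.mpr ⟨s, hs, (PySem.Chars.isIn_iff_infix _ _).mpr hinf⟩
    simp [h] at this
  · rcases List.any_eq_true.mp h with ⟨s, hs, hin⟩
    exact (pvScanMarkers_iff _ _).mpr
      ⟨s.toList, List.mem_map_of_mem hs, (PySem.Chars.isIn_iff_infix _ _).mp hin⟩

-- ===== VERDICT (by name: the statement is the Claim_ definition above) =====
theorem looks_like_vision_unavailable_py_spec : Claim_equal_looks_like_vision_unavailable_py := by
  intro s _
  unfold Spec_looks_like_vision_unavailable_py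
  unfold looks_like_vision_unavailable_py looks_like_vision_unavailable_py_alt
  rw [pvScanMarkers_eq_any]
  simp [PySem.Str.isIn]
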